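-- pv_equiv track=rewrite | github.com/ashish-c-naik/leetcode_submission | 859. Buddy Strings.py | twosamecharac
-- ===== SOURCE A (Python) =====
-- def twosamecharac(A):
--     d = {}
--     for x in A:
--         if x in d:
--             return True
--         else:
--             d[x] = 1
--     return False
-- ===== SOURCE B (Python) =====
-- def twosamecharac(A):
--     s = sorted(A)
--     return any(x == y for x, y in zip(s, s[1:]))
-- ===== Notes on version B (the rewrite author's own statement) =====
-- stated objective: alternative
-- what changed: Replaces the hash-dict loop with early exit by a sort-then-scan: sort the characters and report a duplicate iff some adjacent sorted pair is equal.
import Mathlib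
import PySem

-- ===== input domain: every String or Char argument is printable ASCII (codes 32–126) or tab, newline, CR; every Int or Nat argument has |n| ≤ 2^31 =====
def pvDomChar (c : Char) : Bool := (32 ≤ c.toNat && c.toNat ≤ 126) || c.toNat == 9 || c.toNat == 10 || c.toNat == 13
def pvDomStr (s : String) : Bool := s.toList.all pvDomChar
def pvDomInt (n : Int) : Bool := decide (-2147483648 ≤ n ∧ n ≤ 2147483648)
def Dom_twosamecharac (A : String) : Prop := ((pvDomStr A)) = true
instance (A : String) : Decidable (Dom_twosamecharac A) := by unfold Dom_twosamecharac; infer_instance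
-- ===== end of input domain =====

-- B replaces A's hash-dict loop with sort-then-adjacent-scan: sort the characters, a duplicate
-- exists iff some adjacent sorted pair is equal. No speed claim.

-- ===== PORT A =====
-- the 'for x in A' loop with its early 'return True', carrying the dict d
def twoLoop (xs : List Char) (d : PySem.Dict Char Int) : Bool :=
  match xs with
  | [] => false
  | x :: rest =>
      if d.contains x then true
      else twoLoop rest (d.insert x 1)

def twosamecharac (A : String) : Bool :=
  twoLoop A.toList PySem.Dict.empty

-- ===== PORT B =====
-- s = sorted(A); any(x == y for x, y in zip(s, s[1:]))
def twosamecharac_alt (A : String) : Bool :=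
  let s := PySem.List.sorted A.toList (fun x => x) false
  (s.zip (PySem.List.slice s (some 1) none)).any (fun p => p.1 == p.2)

-- ===== PRECONDITION & SPEC =====
def Spec_twosamecharac (A : String) (out : Bool) : Prop := out = twosamecharac_alt A
instance (A : String) (out : Bool) : Decidable (Spec_twosamecharac A out) := by unfold Spec_twosamecharac; infer_instance

-- ===== CLAIM (what is proved, stated in full; the proofs are below) =====
def Claim_equal_twosamecharac : Prop := ∀ (A : String), Dom_twosamecharac A → Spec_twosamecharac A (twosamecharac A)

-- ===== LEMMAS AND PROOFS =====

-- characterisation of A's loop: true iff the seen keys together with the rest are not all distinct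
lemma twoLoop_eq (xs : List Char) (d : PySem.Dict Char Int) (hd : d.keys.Nodup) :
    twoLoop xs d = !decide ((d.keys ++ xs).Nodup) := by
  induction xs generalizing d with
  | nil => simp [twoLoop, hd]
  | cons x xs ih =>
      by_cases hx : d.contains x = true
      · have hmem := (PySem.Dict.contains_iff_mem_keys d x).1 hx
        have hnot : ¬ (d.keys ++ x :: xs).Nodup := fun h =>
          ((List.nodup_append.1 h).2.2 x hmem x List.mem_cons_self) rfl
        simp [twoLoop, hx, hnot]
      · have hx' : d.contains x = false := by simpa using hx
        have hxmem : x ∉ d.keys := fun h => by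
          simp [(PySem.Dict.contains_iff_mem_keys d x).2 h] at hx'
        have hkeys : (d.insert x 1).keys = d.keys ++ [x] :=
          PySem.Dict.keys_insert_of_not_contains d 1 hx'
        have hnd : (d.insert x 1).keys.Nodup := by
          rw [hkeys, List.nodup_append]
          refine ⟨hd, List.nodup_singleton x, fun a ha b hb he => ?_⟩
          have hbx : b = x := by simpa using hb
          subst he; subst hbx; exact hxmem ha
        rw [twoLoop, if_neg (by simp [hx']), ih _ hnd, hkeys, List.append_assoc,
          List.singleton_append]

-- adjacent-pair scan on a ≤-sorted list is true exactly when the list has a duplicate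
lemma adj_scan_eq (s : List Char) (hs : s.Pairwise (· ≤ ·)) :
    (s.zip s.tail).any (fun p => p.1 == p.2) = !decide s.Nodup := by
  induction s with
  | nil => simp
  | cons x t ih =>
      cases t with
      | nil => simp
      | cons y t =>
          have hp := List.pairwise_cons.1 hs
          by_cases hxy : x = y
          · subst hxy
            simp [List.zip]
          · have hxnot : x ∉ y :: t := by
              intro hmem
              have hle : x ≤ y := hp.1 y List.mem_cons_self
              rcases List.mem_cons.1 hmem with h | h
              · exact hxy h
              · have hyx : y ≤ x := by
                  have := (List.pairwise_cons.1 hp.2).1 x h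
                  exact this
                exact hxy (le_antisymm hle hyx)
            have := ih hp.2
            simp only [List.any_cons, List.tail_cons, List.zip_cons_cons]
            simp only [List.tail_cons] at this
            simp [beq_iff_eq, hxy, this, hxnot]

-- ===== VERDICT (by name: the statement is the Claim_ definition above) =====
theorem twosamecharac_spec : Claim_equal_twosamecharac := by
  intro A _
  unfold Spec_twosamecharac twosamecharac twosamecharac_alt
  rw [twoLoop_eq _ _ (by simp [PySem.Dict.keys_empty])]
  have hperm : (PySem.List.sorted A.toList (fun x => x) false).Perm A.toList :=
    PySem.List.sorted_perm _ _ _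
  have hpair : (PySem.List.sorted A.toList (fun x => x) false).Pairwise (· ≤ ·) := by
    simpa using PySem.List.sorted_pairwise A.toList (fun x => x)
  simp only [PySem.List.slice_from_one]
  rw [adj_scan_eq _ hpair]
  have : (PySem.List.sorted A.toList (fun x => x) false).Nodup ↔ A.toList.Nodup :=
    hperm.nodup_iff
  simp [PySem.Dict.keys_empty, this]
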